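-- pv_equiv track=rewrite | github.com/Puuuuuur/ER-Creater | er_parser.py | extract_column_type
-- ===== SOURCE A (Python) =====
-- from typing import Dict, List, Optional, Set, Tuple
--
-- COLUMN_CONSTRAINT_KEYWORDS = {
--     "NOT",
--     "NULL",
--     "DEFAULT",
--     "AUTO_INCREMENT",
--     "PRIMARY",
--     "UNIQUE",
--     "COMMENT",
--     "REFERENCES",
--     "COLLATE",
--     "CHARACTER",
--     "CHECK",
--     "CONSTRAINT",
--     "ON",
--     "GENERATED",
--     "AS",
--     "VIRTUAL",
--     "STORED",
-- }
--
-- def extract_column_type(rest: str) -> str: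
--     rest = rest.strip()
--     if not rest:
--         return "UNKNOWN"
--
--     depth = 0
--     quote: Optional[str] = None
--     escaped = False
--
--     for i, ch in enumerate(rest):
--         if quote:
--             if escaped:
--                 escaped = False
--             elif ch == "\\":
--                 escaped = True
--             elif ch == quote:
--                 quote = None
--             continue
--
--         if ch in ("'", '"', "`"):
--             quote = ch
--             continue
--
--         if ch == "(":
--             depth += 1
--             continue
--
--         if ch == ")":
--             depth = max(depth - 1, 0)
--             continue
--
--         if ch.isspace() and depth == 0:
--             remainder = rest[i:].lstrip()
--             keyword = remainder.split(None, 1)[0].upper() if remainder else ""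
--             if keyword in COLUMN_CONSTRAINT_KEYWORDS:
--                 return rest[:i].strip()
--
--     return rest
-- ===== SOURCE B (Python) =====
-- COLUMN_CONSTRAINT_KEYWORDS = {
--     "NOT", "NULL", "DEFAULT", "AUTO_INCREMENT", "PRIMARY", "UNIQUE",
--     "COMMENT", "REFERENCES", "COLLATE", "CHARACTER", "CHECK", "CONSTRAINT",
--     "ON", "GENERATED", "AS", "VIRTUAL", "STORED",
-- }
--
-- def extract_column_type(rest: str) -> str:
--     rest = rest.strip()
--     if not rest:
--         return "UNKNOWN"
--
--     # Phase 1: tokenize into top-level tokens, each with its end offset.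
--     tokens = []  # (token, end offset in rest)
--     depth = 0
--     quote = None
--     escaped = False
--     cur = []
--     for i, ch in enumerate(rest):
--         boundary = False
--         if quote:
--             if escaped:
--                 escaped = False
--             elif ch == "\\":
--                 escaped = True
--             elif ch == quote:
--                 quote = None
--         elif ch in ("'", '"', "`"):
--             quote = ch
--         elif ch == "(":
--             depth += 1
--         elif ch == ")":
--             depth = max(depth - 1, 0)
--         elif ch.isspace() and depth == 0:
--             boundary = True
--             if cur:
--                 tokens.append(("".join(cur), i))
--                 cur = []
--         if not boundary:
--             cur.append(ch)
--     if cur: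
--         tokens.append(("".join(cur), len(rest)))
--
--     # Phase 2: first token (never the first one) that is a constraint keyword
--     # cuts the type at the end of the preceding token.
--     for idx in range(1, len(tokens)):
--         if tokens[idx][0].upper() in COLUMN_CONSTRAINT_KEYWORDS:
--             return rest[:tokens[idx - 1][1]]
--     return rest
-- ===== Notes on version B (the rewrite author's own statement) =====
-- stated objective: alternative
-- what changed: B replaces A's single scan that re-slices and re-splits the whole remaining string (rest[i:].lstrip() + split) at every top-level whitespace with two phases: one pass that builds a token table (top-level tokens with end offsets) and a separate scan of that table for the first constraint-keyword token, cutting at the preceding token's end offset.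
import Mathlib
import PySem

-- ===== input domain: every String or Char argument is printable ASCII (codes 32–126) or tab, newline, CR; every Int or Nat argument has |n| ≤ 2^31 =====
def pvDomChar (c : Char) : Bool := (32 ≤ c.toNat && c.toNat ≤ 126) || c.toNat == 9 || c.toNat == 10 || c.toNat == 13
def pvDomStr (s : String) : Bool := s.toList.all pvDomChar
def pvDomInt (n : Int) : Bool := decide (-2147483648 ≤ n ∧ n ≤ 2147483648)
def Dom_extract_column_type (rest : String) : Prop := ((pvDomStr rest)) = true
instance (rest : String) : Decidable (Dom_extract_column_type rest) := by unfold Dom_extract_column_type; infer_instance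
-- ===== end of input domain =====

-- B re-implements A in two phases (tokenize with end offsets, then scan the token table)
-- instead of A's single scan that re-examines the tail (lstrip + split) at every top-level
-- whitespace; equivalence of the return values is proved below.

-- ===== PORT A =====

def pvKW : List (List Char) :=
  ["NOT".toList, "NULL".toList, "DEFAULT".toList, "AUTO_INCREMENT".toList, "PRIMARY".toList,
   "UNIQUE".toList, "COMMENT".toList, "REFERENCES".toList, "COLLATE".toList, "CHARACTER".toList,
   "CHECK".toList, "CONSTRAINT".toList, "ON".toList, "GENERATED".toList, "AS".toList,
   "VIRTUAL".toList, "STORED".toList]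

def pvIsQuote (c : Char) : Bool := c == '\'' || c == '"' || c == '`'

/-- A's for-loop: returns `some i` at the `return rest[:i].strip()` statement, `none` when the
loop falls through.  `depth - 1` on Nat is exactly Python's `max(depth - 1, 0)`. -/
def pvScanA : List Char → Nat → Nat → Option Char → Bool → Option Nat
  | [], _, _, _, _ => none
  | ch :: tl, i, depth, some q, esc =>
      if esc then pvScanA tl (i + 1) depth (some q) false
      else if ch == '\\' then pvScanA tl (i + 1) depth (some q) true
      else if ch == q then pvScanA tl (i + 1) depth none false
      else pvScanA tl (i + 1) depth (some q) false
  | ch :: tl, i, depth, none, esc =>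
      if pvIsQuote ch then pvScanA tl (i + 1) depth (some ch) esc
      else if ch == '(' then pvScanA tl (i + 1) (depth + 1) none esc
      else if ch == ')' then pvScanA tl (i + 1) (depth - 1) none esc
      else if PySem.Chars.isspace ch && depth == 0 then
        let remainder := PySem.Chars.lstrip (ch :: tl)
        let keyword : List Char :=
          if remainder.isEmpty then []
          else PySem.Chars.upper ((PySem.Chars.split₀Max remainder 1).headD [])
        if pvKW.contains keyword then some i
        else pvScanA tl (i + 1) depth none esc
      else pvScanA tl (i + 1) depth none esc

def extract_column_type (rest : String) : String :=
  let r := PySem.Chars.strip rest.toList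
  if r.isEmpty then "UNKNOWN"
  else
    match pvScanA r 0 0 none false with
    | some i => String.ofList (PySem.Chars.strip (PySem.Chars.slice r none (some (i : Int))))
    | none => String.ofList r

-- ===== PORT B =====

/-- B's phase 1: the token table — top-level tokens of `r` with their end offsets. -/
def pvTokB : List Char → Nat → Nat → Option Char → Bool → List Char → List (List Char × Nat)
  | [], i, _, _, _, cur => if cur.isEmpty then [] else [(cur.reverse, i)]
  | ch :: tl, i, depth, some q, esc, cur =>
      if esc then pvTokB tl (i + 1) depth (some q) false (ch :: cur)
      else if ch == '\\' then pvTokB tl (i + 1) depth (some q) true (ch :: cur)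
      else if ch == q then pvTokB tl (i + 1) depth none false (ch :: cur)
      else pvTokB tl (i + 1) depth (some q) false (ch :: cur)
  | ch :: tl, i, depth, none, esc, cur =>
      if pvIsQuote ch then pvTokB tl (i + 1) depth (some ch) esc (ch :: cur)
      else if ch == '(' then pvTokB tl (i + 1) (depth + 1) none esc (ch :: cur)
      else if ch == ')' then pvTokB tl (i + 1) (depth - 1) none esc (ch :: cur)
      else if PySem.Chars.isspace ch && depth == 0 then
        if cur.isEmpty then pvTokB tl (i + 1) depth none esc cur
        else (cur.reverse, i) :: pvTokB tl (i + 1) depth none esc []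
      else pvTokB tl (i + 1) depth none esc (ch :: cur)

/-- B's phase 2: first keyword token (from index 1 on) cuts at the previous token's end. -/
def pvFindCut : Nat → List (List Char × Nat) → Option Nat
  | _, [] => none
  | prevEnd, (t, e) :: ts =>
      if pvKW.contains (PySem.Chars.upper t) then some prevEnd else pvFindCut e ts

def extract_column_type_alt (rest : String) : String :=
  let r := PySem.Chars.strip rest.toList
  if r.isEmpty then "UNKNOWN"
  else
    match pvTokB r 0 0 none false [] with
    | [] => String.ofList r
    | (_, e0) :: ts =>
      match pvFindCut e0 ts with
      | some p => String.ofList (r.take p)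
      | none => String.ofList r

-- ===== PRECONDITION & SPEC =====
def Spec_extract_column_type (rest : String) (out : String) : Prop := out = extract_column_type_alt rest
instance (rest : String) (out : String) : Decidable (Spec_extract_column_type rest out) := by unfold Spec_extract_column_type; infer_instance

-- ===== CLAIM (what is proved, stated in full; the proofs are below) =====
def Claim_equal_extract_column_type : Prop := ∀ (rest : String), Dom_extract_column_type rest → Spec_extract_column_type rest (extract_column_type rest)

-- ===== LEMMAS AND PROOFS =====

/-- the first word (`remainder.split(None, 1)[0]`) of the text from here on. -/
def pvWord (l : List Char) : List Char :=
  (PySem.Chars.lstrip l).takeWhile (fun c => !PySem.Chars.isspace c)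

def pvKwTok (t : List Char) : Bool := pvKW.contains (PySem.Chars.upper t)

/-- proof-side view of B's phase 2 that also covers the "no token seen yet" state. -/
def pvG : Option Nat → List (List Char × Nat) → Option Nat
  | _, [] => none
  | none, (_, e) :: ts => pvG (some e) ts
  | some p, (t, e) :: ts => if pvKwTok t then some p else pvG (some e) ts

/-- a cut offset is sound: the prefix it cuts ends in a non-space character. -/
def pvQ (g : List Char) (e : Nat) : Prop :=
  ∃ c, (g.take e).getLast? = some c ∧ PySem.Chars.isspace c = false

def pvPlain (c : Char) : Bool :=
  !(pvIsQuote c) && !(c == '\\') && !(c == '(') && !(c == ')') && !(PySem.Chars.isspace c)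

lemma pvPlain_of_range (c : Char)
    (h : (65 ≤ c.toNat ∧ c.toNat ≤ 90) ∨ c.toNat = 95 ∨ (97 ≤ c.toNat ∧ c.toNat ≤ 122)) :
    pvPlain c = true := by
  have h39 : c ≠ '\'' := by rintro rfl; simp [Char.toNat] at h
  have h34 : c ≠ '"' := by rintro rfl; simp [Char.toNat] at h
  have h96 : c ≠ '`' := by rintro rfl; simp [Char.toNat] at h
  have h92 : c ≠ '\\' := by rintro rfl; simp [Char.toNat] at h
  have h40 : c ≠ '(' := by rintro rfl; simp [Char.toNat] at h
  have h41 : c ≠ ')' := by rintro rfl; simp [Char.toNat] at h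
  have hsp : PySem.Chars.isspace c = false := by simp [PySem.Chars.isspace]; omega
  simp [pvPlain, pvIsQuote, h39, h34, h96, h92, h40, h41, hsp]

lemma pvUpperChar_range (c : Char)
    (h : (65 ≤ (PySem.Chars.upperChar c).toNat ∧ (PySem.Chars.upperChar c).toNat ≤ 90) ∨
          (PySem.Chars.upperChar c).toNat = 95) :
    pvPlain c = true := by
  by_cases hl : PySem.Chars.islower c = true
  · have hb : 97 ≤ c.toNat ∧ c.toNat ≤ 122 := by
      simpa [PySem.Chars.islower, Char.le_def] using hl
    exact pvPlain_of_range c (Or.inr (Or.inr hb))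
  · have : PySem.Chars.upperChar c = c := by simp [PySem.Chars.upperChar, hl]
    rw [this] at h
    exact pvPlain_of_range c (by omega)

lemma pvKw_all_plain (t : List Char) (h : pvKwTok t = true) : t.all pvPlain = true := by
  have hmem : PySem.Chars.upper t ∈ pvKW := by
    simpa [pvKwTok] using h
  have hKW : ∀ k ∈ pvKW, k.all
      (fun d => ((65 ≤ d.toNat && d.toNat ≤ 90) || d.toNat == 95)) = true := by decide
  have hok := hKW _ hmem
  rw [List.all_eq_true] at hok ⊢
  intro c hc
  have := hok (PySem.Chars.upperChar c) (by simp [PySem.Chars.upper]; exact ⟨c, hc, rfl⟩)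
  apply pvUpperChar_range
  simpa using this

lemma pvKwTok_nil : pvKwTok [] = false := by decide

lemma pvIsQuote_not_space (c : Char) (h : pvIsQuote c = true) : PySem.Chars.isspace c = false := by
  simp [pvIsQuote] at h
  rcases h with (rfl | rfl) | rfl <;> decide

lemma pvSpace_not_special (c : Char) (h : PySem.Chars.isspace c = true) :
    pvIsQuote c = false ∧ (c == '(') = false ∧ (c == ')') = false := by
  refine ⟨?_, ?_, ?_⟩
  · cases hq : pvIsQuote c
    · rfl
    · rw [pvIsQuote_not_space c hq] at h; exact absurd h (by simp)
  · cases hb : (c == '(')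
    · rfl
    · have hc : c = '(' := by simpa using hb
      subst hc; exact absurd h (by decide)
  · cases hb : (c == ')')
    · rfl
    · have hc : c = ')' := by simpa using hb
      subst hc; exact absurd h (by decide)

lemma pvPlain_spec (c : Char) (h : pvPlain c = true) :
    pvIsQuote c = false ∧ (c == '\\') = false ∧ (c == '(') = false ∧ (c == ')') = false ∧
      PySem.Chars.isspace c = false := by
  simp only [pvPlain, Bool.and_eq_true, Bool.not_eq_true'] at h
  obtain ⟨⟨⟨⟨hq, hb⟩, hp1⟩, hp2⟩, hs⟩ := h
  exact ⟨hq, hb, hp1, hp2, hs⟩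

lemma pvHead_dropWhile {p : Char → Bool} {l : List Char} {c : Char}
    (h : (List.dropWhile p l).head? = some c) : p c = false := by
  induction l with
  | nil => simp at h
  | cons a t ih =>
    rw [List.dropWhile_cons] at h
    by_cases ha : p a = true
    · rw [if_pos ha] at h; exact ih h
    · rw [if_neg ha] at h
      simp at h
      subst h
      simpa using ha

lemma pvDropWhile_of_head {p : Char → Bool} {l : List Char} (h : ∀ c, l.head? = some c → p c = false) :
    List.dropWhile p l = l := by
  cases l with
  | nil => rfl
  | cons a t => rw [List.dropWhile_cons]; simp [h a rfl]

lemma pvStripId (l : List Char)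
    (h1 : ∀ c, l.head? = some c → PySem.Chars.isspace c = false)
    (h2 : ∀ c, l.getLast? = some c → PySem.Chars.isspace c = false) :
    PySem.Chars.strip l = l := by
  have ha : List.dropWhile PySem.Chars.isspace l = l := pvDropWhile_of_head h1
  have hb : List.dropWhile PySem.Chars.isspace l.reverse = l.reverse :=
    pvDropWhile_of_head (fun c hc => h2 c (by rwa [List.head?_reverse] at hc))
  simp [PySem.Chars.strip, PySem.Chars.lstrip, PySem.Chars.rstrip, ha, hb]

lemma pvStrip_head (x : List Char) (c : Char)
    (h : (PySem.Chars.strip x).head? = some c) : PySem.Chars.isspace c = false := by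
  obtain ⟨t, ht⟩ := List.dropWhile_suffix (l := (PySem.Chars.lstrip x).reverse) PySem.Chars.isspace
  have hz : PySem.Chars.lstrip x =
      PySem.Chars.strip x ++ t.reverse := by
    have := congrArg List.reverse ht
    simpa [PySem.Chars.strip, PySem.Chars.rstrip] using this.symm
  have hhead : (PySem.Chars.lstrip x).head? = some c := by
    rw [hz]
    cases hc : (PySem.Chars.strip x) with
    | nil => rw [hc] at h; simp at h
    | cons a u => rw [hc] at h; simp at h; simp [h]
  exact pvHead_dropWhile hhead

lemma pvWord_cons_space (ch : Char) (tl : List Char) (h : PySem.Chars.isspace ch = true) :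
    pvWord (ch :: tl) = pvWord tl := by
  simp [pvWord, PySem.Chars.lstrip, h]

lemma pvTakeWhileAppend (p : Char → Bool) (u v : List Char) (h : ∀ c ∈ u, p c = true) :
    (u ++ v).takeWhile p = u ++ v.takeWhile p := by
  induction u with
  | nil => simp
  | cons a w ih =>
    simp only [List.cons_append, List.takeWhile_cons, h a (by simp)]
    rw [ih (fun c hc => h c (by simp [hc]))]
    simp

lemma pvWord_plain_append (t v : List Char) (hp : t.all pvPlain = true) (hne : t ≠ [])
    (hv : ∀ c, v.head? = some c → PySem.Chars.isspace c = true) :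
    pvWord (t ++ v) = t := by
  rw [List.all_eq_true] at hp
  have hns : ∀ c ∈ t, PySem.Chars.isspace c = false := fun c hc => (pvPlain_spec c (hp c hc)).2.2.2.2
  have hls : PySem.Chars.lstrip (t ++ v) = t ++ v := by
    apply pvDropWhile_of_head
    intro c hc
    cases t with
    | nil => exact absurd rfl hne
    | cons a u => simp at hc; exact hc ▸ hns a (by simp)
  unfold pvWord
  rw [hls, pvTakeWhileAppend _ t v (fun c hc => by simp [hns c hc])]
  cases v with
  | nil => simp
  | cons b w =>
    have := hv b rfl
    simp [this]

/-- a keyword token forces the first word there to be that token. -/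
lemma pvKw_token_of_word (t v : List Char) (hne : t ≠ [])
    (hv : ∀ c, v.head? = some c → PySem.Chars.isspace c = true)
    (hw : pvKwTok (pvWord (t ++ v)) = false) : pvKwTok t = false := by
  by_contra h
  have h' : pvKwTok t = true := by revert h; cases pvKwTok t <;> simp
  rw [pvWord_plain_append t v (pvKw_all_plain t h') hne hv] at hw
  rw [h'] at hw; simp at hw

lemma pvGoZero (n : Nat) (l2 tw : List Char) :
    (PySem.Chars.split₀Max.go n 0 l2 [tw]).headD [] = tw := by
  cases n with
  | zero => rw [PySem.Chars.split₀Max.go]; simp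
  | succ m =>
    rw [PySem.Chars.split₀Max.go]
    cases h : List.dropWhile PySem.Chars.isspace l2 <;> simp

lemma pvSplitHead (l : List Char) (h : PySem.Chars.lstrip l ≠ []) :
    (PySem.Chars.split₀Max (PySem.Chars.lstrip l) 1).headD [] =
      pvWord l := by
  have hidem : List.dropWhile PySem.Chars.isspace (PySem.Chars.lstrip l) = PySem.Chars.lstrip l :=
    pvDropWhile_of_head (fun c hc => pvHead_dropWhile hc)
  obtain ⟨c, rest, hz⟩ : ∃ c rest, PySem.Chars.lstrip l = c :: rest := by
    cases hc : PySem.Chars.lstrip l with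
    | nil => exact absurd hc h
    | cons a u => exact ⟨a, u, rfl⟩
  unfold PySem.Chars.split₀Max
  rw [if_neg (by norm_num)]
  rw [hz, PySem.Chars.split₀Max.go]
  rw [hz] at hidem
  simp only [List.length_cons]
  rw [hidem]
  simp only [Int.toNat_one]
  rw [if_neg (by omega)]
  rw [← hz, pvGoZero]
  rfl

lemma pvTokB_plain (u : List Char) (hp : u.all pvPlain = true) :
    ∀ (v : List Char) (i d : Nat) (esc : Bool) (cur : List Char),
    pvTokB (u ++ v) i d none esc cur = pvTokB v (i + u.length) d none esc (u.reverse ++ cur) := by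
  induction u with
  | nil => intro v i d esc cur; simp
  | cons c u' ih =>
    intro v i d esc cur
    rw [List.all_cons, Bool.and_eq_true] at hp
    obtain ⟨hq, hb, h1, h2, hs⟩ := pvPlain_spec c hp.1
    show pvTokB (c :: (u' ++ v)) i d none esc cur = _
    rw [pvTokB]
    rw [if_neg (by simp [hq]), if_neg (by simp [h1]), if_neg (by simp [h2]),
        if_neg (by simp [hs])]
    rw [ih hp.2 v (i+1) d esc (c :: cur)]
    simp [Nat.add_assoc, Nat.add_comm 1]

lemma pvTokB_ws (u : List Char) (hs : u.all PySem.Chars.isspace = true) :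
    ∀ (v : List Char) (i : Nat) (esc : Bool),
    pvTokB (u ++ v) i 0 none esc [] = pvTokB v (i + u.length) 0 none esc [] := by
  induction u with
  | nil => intro v i esc; simp
  | cons c u' ih =>
    intro v i esc
    rw [List.all_cons, Bool.and_eq_true] at hs
    obtain ⟨hq, h1, h2⟩ := pvSpace_not_special c hs.1
    show pvTokB (c :: (u' ++ v)) i 0 none esc [] = _
    rw [pvTokB]
    rw [if_neg (by simp [hq]), if_neg (by simp [h1]), if_neg (by simp [h2]),
        if_pos (by simp [hs.1]), if_pos (by simp)]
    rw [ih hs.2 v (i+1) esc]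
    simp [Nat.add_assoc, Nat.add_comm 1]

/-- if the upcoming first word is a keyword, B's scan cuts at the pending offset `p`. -/
lemma pvG_kw (cs : List Char) (i p : Nat) (esc : Bool) (hkw : pvKwTok (pvWord cs) = true) :
    pvG (some p) (pvTokB cs i 0 none esc []) = some p := by
  have hsplit1 : cs = cs.takeWhile PySem.Chars.isspace ++ PySem.Chars.lstrip cs :=
    (List.takeWhile_append_dropWhile).symm
  have hsplit2 : PySem.Chars.lstrip cs =
      pvWord cs ++ (PySem.Chars.lstrip cs).dropWhile (fun c => !PySem.Chars.isspace c) :=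
    (List.takeWhile_append_dropWhile).symm
  have hwne : pvWord cs ≠ [] := by
    intro hw; rw [hw, pvKwTok_nil] at hkw; simp at hkw
  have hplain := pvKw_all_plain _ hkw
  conv_lhs => rw [hsplit1, pvTokB_ws _ (by
    rw [List.all_eq_true]; exact fun c hc => List.mem_takeWhile_imp hc)]
  conv_lhs => rw [hsplit2, pvTokB_plain _ hplain]
  set j := i + (cs.takeWhile PySem.Chars.isspace).length + (pvWord cs).length
  set u := (PySem.Chars.lstrip cs).dropWhile (fun c => !PySem.Chars.isspace c) with hu
  cases hcu : u with
  | nil =>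
    rw [pvTokB]
    rw [if_neg (by simp [hwne])]
    simp [pvG, hkw]
  | cons c u' =>
    have hcsp : PySem.Chars.isspace c = true := by
      have := pvHead_dropWhile (p := fun c => !PySem.Chars.isspace c) (l := PySem.Chars.lstrip cs)
        (c := c) (by rw [← hu, hcu]; rfl)
      simpa using this
    obtain ⟨hq, h1, h2⟩ := pvSpace_not_special c hcsp
    rw [pvTokB]
    rw [if_neg (by simp [hq]), if_neg (by simp [h1]), if_neg (by simp [h2]),
        if_pos (by simp [hcsp]), if_neg (by simp [hwne])]
    simp [pvG, hkw]

lemma pvG_eq_findCut (p : Nat) (l : List (List Char × Nat)) : pvG (some p) l = pvFindCut p l := by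
  induction l generalizing p with
  | nil => rfl
  | cons h t ih => cases h with | mk a b => simp [pvG, pvFindCut, pvKwTok, ih]

lemma pvTakeLast (g : List Char) (i : Nat) (c : Char) (rest : List Char)
    (hd : g.drop (i - 1) = c :: rest) (hi : 1 ≤ i) : (g.take i).getLast? = some c := by
  have h0 : g[i-1]? = some c := by
    have : (g.drop (i-1))[0]? = g[(i-1)+0]? := List.getElem?_drop
    rw [hd] at this; simpa using this.symm
  have hlt : i - 1 < g.length := (List.getElem?_eq_some_iff.mp h0).1
  have hgi : g[i-1]'hlt = c := by
    have := List.getElem?_eq_some_iff.mp h0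
    exact this.2
  obtain ⟨j, rfl⟩ : ∃ j, i = j + 1 := ⟨i - 1, by omega⟩
  simp only [Nat.add_sub_cancel] at hlt hgi
  rw [List.take_succ_eq_append_getElem hlt, List.getLast?_append_of_ne_nil _ (by simp), hgi]
  simp

lemma pvHeadTake {l : List Char} {n : Nat} {c : Char} (h : (l.take n).head? = some c) :
    l.head? = some c := by
  cases l with
  | nil => simp at h
  | cons b rs =>
    cases n with
    | zero => simp at h
    | succ m => simpa using h

/-- MAIN: A's scan and B's tokenize-then-scan agree, plus soundness of the produced offset. -/
lemma pvMain (g : List Char) :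
    ∀ (cs : List Char) (i d : Nat) (q : Option Char) (esc : Bool) (cur : List Char)
      (prev : Option Nat),
      g.drop i = cs →
      (∀ qc, q = some qc → pvIsQuote qc = true) →
      (cur = [] → d = 0 ∧ q = none) →
      (∀ c, cur.getLast? = some c → PySem.Chars.isspace c = false) →
      (∀ c, cur.head? = some c →
        1 ≤ i ∧ g.drop (i - 1) = c :: cs ∧
          (PySem.Chars.isspace c = true → ¬(d = 0 ∧ q = none))) →
      (prev = none → cur = [] → ∀ c, cs.head? = some c → PySem.Chars.isspace c = false) →
      (∀ p, prev = some p → pvKwTok (pvWord (cur.reverse ++ cs)) = false ∧ pvQ g p) →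
      pvScanA cs i d q esc = pvG prev (pvTokB cs i d q esc cur) ∧
        (∀ e, pvG prev (pvTokB cs i d q esc cur) = some e → pvQ g e) := by
  intro cs
  induction cs with
  | nil =>
    intro i d q esc cur prev hg hq hcur0 hcurL hcurH hstart hprev
    rw [pvScanA, pvTokB]
    cases hc : cur with
    | nil => exact ⟨by simp [pvG], by simp [pvG]⟩
    | cons a cur' =>
      rw [if_neg (show ¬((a :: cur').isEmpty = true) by simp)]
      cases prev with
      | none => exact ⟨by simp [pvG], by simp [pvG]⟩
      | some p =>
        have hkwf : pvKwTok (cur'.reverse ++ [a]) = false := by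
          apply pvKw_token_of_word _ [] (by simp) (by simp)
          have h2 := (hprev p rfl).1
          rw [hc] at h2; simpa using h2
        exact ⟨by simp [pvG, hkwf], by simp [pvG, hkwf]⟩
  | cons ch tl ih =>
    intro i d q esc cur prev hg hq hcur0 hcurL hcurH hstart hprev
    have hg' : g.drop (i+1) = tl := by
      have h1 : g.drop (i+1) = (g.drop i).drop 1 := by rw [List.drop_drop, Nat.add_comm]
      rw [h1, hg]; rfl
    have hg1 : g.drop ((i+1) - 1) = ch :: tl := by simpa using hg
    -- generic step for every branch that appends ch to the current token
    have push : ∀ (d' : Nat) (q' : Option Char) (esc' : Bool),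
        (∀ qc, q' = some qc → pvIsQuote qc = true) →
        (PySem.Chars.isspace ch = true → ¬(d' = 0 ∧ q' = none)) →
        (cur = [] → PySem.Chars.isspace ch = false) →
        pvScanA tl (i+1) d' q' esc' = pvG prev (pvTokB tl (i+1) d' q' esc' (ch :: cur)) ∧
          (∀ e, pvG prev (pvTokB tl (i+1) d' q' esc' (ch :: cur)) = some e → pvQ g e) := by
      intro d' q' esc' hq' hsp' hch0
      apply ih (i+1) d' q' esc' (ch :: cur) prev hg' hq'
      · intro hcc; cases hcc
      · intro c hcl
        cases hcu : cur with
        | nil =>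
          rw [hcu] at hcl; simp at hcl
          rw [← hcl]; exact hch0 hcu
        | cons a cur' =>
          rw [hcu] at hcl; rw [List.getLast?_cons_cons] at hcl
          exact hcurL c (by rw [hcu]; exact hcl)
      · intro c hch
        simp at hch
        subst hch
        exact ⟨by omega, hg1, hsp'⟩
      · intro _ hcc; cases hcc
      · intro p hp
        have hh := hprev p hp
        refine ⟨?_, hh.2⟩
        rw [show (ch :: cur).reverse ++ tl = cur.reverse ++ (ch :: tl) by simp]
        exact hh.1
    cases q with
    | some qc =>
      have hqc := hq qc rfl
      rw [pvScanA, pvTokB]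
      cases esc with
      | true =>
        rw [if_pos rfl]
        exact push d (some qc) false (fun _ h => by cases h; exact hqc)
          (fun _ hh => by cases hh.2) (fun hc => by cases (hcur0 hc).2)
      | false =>
        rw [if_neg (by simp : ¬(false = true))]
        by_cases hb : (ch == '\\') = true
        · rw [if_pos hb, if_pos hb]
          exact push d (some qc) true (fun _ h => by cases h; exact hqc)
            (fun _ hh => by cases hh.2) (fun hc => by cases (hcur0 hc).2)
        · rw [if_neg hb, if_neg hb]
          by_cases hbq : (ch == qc) = true
          · rw [if_pos hbq, if_pos hbq]
            refine push d none false (fun _ h => by cases h) ?_ (fun hc => by cases (hcur0 hc).2)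
            intro hsp _
            have : ch = qc := by simpa using hbq
            rw [this, pvIsQuote_not_space qc hqc] at hsp; cases hsp
          · rw [if_neg hbq, if_neg hbq]
            exact push d (some qc) false (fun _ h => by cases h; exact hqc)
              (fun _ hh => by cases hh.2) (fun hc => by cases (hcur0 hc).2)
    | none =>
      rw [pvScanA, pvTokB]
      by_cases hQ : pvIsQuote ch = true
      · rw [if_pos hQ, if_pos hQ]
        exact push d (some ch) esc (fun qc h => by cases h; exact hQ)
          (fun _ hh => by cases hh.2) (fun _ => pvIsQuote_not_space ch hQ)
      · rw [if_neg hQ, if_neg hQ]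
        by_cases hP1 : (ch == '(') = true
        · rw [if_pos hP1, if_pos hP1]
          refine push (d+1) none esc (fun _ h => by cases h) (fun _ hh => by omega) ?_
          intro _
          have : ch = '(' := by simpa using hP1
          rw [this]; decide
        · rw [if_neg hP1]
          rw [if_neg hP1]
          by_cases hP2 : (ch == ')') = true
          · rw [if_pos hP2, if_pos hP2]
            refine push (d-1) none esc (fun _ h => by cases h) ?_ ?_
            · intro hsp _
              have : ch = ')' := by simpa using hP2
              rw [this] at hsp; cases hsp
            · intro _
              have : ch = ')' := by simpa using hP2
              rw [this]; decide
          · rw [if_neg hP2, if_neg hP2]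
            by_cases hws : (PySem.Chars.isspace ch && d == 0) = true
            · -- the top-level whitespace boundary
              rw [if_pos hws, if_pos hws]
              have hsp : PySem.Chars.isspace ch = true := by
                rcases Bool.and_eq_true .. |>.mp hws with ⟨h1, _⟩; exact h1
              have hd0 : d = 0 := by
                rcases Bool.and_eq_true .. |>.mp hws with ⟨_, h2⟩; simpa using h2
              subst hd0
              -- A's keyword is the uppercase first word of the remaining text
              have hkeq :
                  (if (PySem.Chars.lstrip (ch :: tl)).isEmpty then ([] : List Char)
                   else PySem.Chars.upper
                     ((PySem.Chars.split₀Max (PySem.Chars.lstrip (ch :: tl)) 1).headD [])) =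
                  PySem.Chars.upper (pvWord (ch :: tl)) := by
                by_cases hrem : (PySem.Chars.lstrip (ch :: tl)).isEmpty = true
                · rw [if_pos hrem]
                  have : PySem.Chars.lstrip (ch :: tl) = [] := by simpa using hrem
                  rw [show pvWord (ch :: tl) = [] by unfold pvWord; rw [this]; rfl]
                  rfl
                · rw [if_neg hrem, pvSplitHead (ch :: tl) (by simpa using hrem)]
              simp only [hkeq]
              have hwcons : pvWord (ch :: tl) = pvWord tl := pvWord_cons_space ch tl hsp
              cases hcu : cur with
              | nil =>
                rw [if_pos (show (([] : List Char)).isEmpty = true by simp)]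
                cases hpv : prev with
                | none =>
                  exact absurd (hstart hpv hcu ch rfl) (by rw [hsp]; simp)
                | some p =>
                  have hh := hprev p hpv
                  rw [hcu] at hh; simp only [List.reverse_nil, List.nil_append] at hh
                  have hkwf : pvKW.contains (PySem.Chars.upper (pvWord (ch :: tl))) = false := hh.1
                  rw [hkwf]
                  simp only [Bool.false_eq_true, if_false]
                  apply ih (i+1) 0 none esc [] (some p) hg' (fun _ h => by cases h)
                    (fun _ => ⟨rfl, rfl⟩) (by simp) (by simp) (fun h => by cases h)
                  intro p' hp'
                  cases hp'
                  refine ⟨?_, hh.2⟩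
                  simp only [List.reverse_nil, List.nil_append]
                  rw [← hwcons]; exact hkwf
              | cons a cur' =>
                rw [if_neg (show ¬((a :: cur').isEmpty = true) by simp)]
                -- the end offset i is sound: r[i-1] is the last token character, not a space
                have hH := hcurH a (by rw [hcu]; rfl)
                have hans : PySem.Chars.isspace a = false := by
                  cases hsa : PySem.Chars.isspace a with
                  | false => rfl
                  | true => exact absurd ⟨rfl, rfl⟩ (hH.2.2 hsa)
                have hQi : pvQ g i := ⟨a, pvTakeLast g i a (ch :: tl) hH.2.1 hH.1, hans⟩
                have hkwtok : ∀ p, prev = some p → pvKwTok (cur'.reverse ++ [a]) = false := by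
                  intro p hp
                  apply pvKw_token_of_word _ (ch :: tl) (by simp)
                    (fun c hc => by cases hc; exact hsp)
                  have h2 := (hprev p hp).1
                  rw [hcu] at h2; simpa using h2
                cases hkw : pvKwTok (pvWord (ch :: tl)) with
                | true =>
                  rw [show pvKW.contains (PySem.Chars.upper (pvWord (ch :: tl))) = true from hkw]
                  simp only [if_pos]
                  have hGkw : pvG (some i) (pvTokB tl (i+1) 0 none esc []) = some i :=
                    pvG_kw tl (i+1) i esc (by rw [← hwcons]; exact hkw)
                  cases prev with
                  | none =>
                    refine ⟨by simp only [pvG, hGkw], ?_⟩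
                    intro e he
                    simp only [pvG, hGkw] at he
                    cases he; exact hQi
                  | some p =>
                    have hkf := hkwtok p rfl
                    refine ⟨by simp [pvG, hkf, hGkw], ?_⟩
                    intro e he
                    simp [pvG, hkf, hGkw] at he
                    cases he; exact hQi
                | false =>
                  rw [show pvKW.contains (PySem.Chars.upper (pvWord (ch :: tl))) = false from hkw]
                  simp only [Bool.false_eq_true, if_false]
                  have hrec := ih (i+1) 0 none esc [] (some i) hg' (fun _ h => by cases h)
                    (fun _ => ⟨rfl, rfl⟩) (by simp) (by simp) (fun h => by cases h)
                    (fun p' hp' => by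
                      cases hp'
                      refine ⟨?_, hQi⟩
                      simp only [List.reverse_nil, List.nil_append]
                      rw [← hwcons]; exact hkw)
                  cases prev with
                  | none => exact ⟨by simp only [pvG]; exact hrec.1, by
                      intro e he; simp only [pvG] at he; exact hrec.2 e he⟩
                  | some p =>
                    have hkf := hkwtok p rfl
                    refine ⟨?_, ?_⟩
                    · simp [pvG, hkf]
                      exact hrec.1
                    · intro e he
                      simp [pvG, hkf] at he
                      exact hrec.2 e he
            · rw [if_neg hws, if_neg hws]
              refine push d none esc (fun _ h => by cases h) ?_ ?_
              · intro hsp hdq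
                rw [hdq.1] at hws
                simp [hsp] at hws
              · intro hc
                have hd0 := (hcur0 hc).1
                rw [hd0] at hws
                cases hsc : PySem.Chars.isspace ch with
                | false => rfl
                | true => rw [hsc] at hws; simp at hws

-- ===== VERDICT (by name: the statement is the Claim_ definition above) =====
theorem extract_column_type_spec : Claim_equal_extract_column_type := by
  intro rest _
  unfold Spec_extract_column_type extract_column_type extract_column_type_alt
  set r := PySem.Chars.strip rest.toList with hr
  by_cases hre : r.isEmpty = true
  · rw [if_pos hre, if_pos hre]
  · rw [if_neg hre, if_neg hre]
    have hhead : ∀ c, r.head? = some c → PySem.Chars.isspace c = false :=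
      fun c hc => pvStrip_head rest.toList c (by rw [← hr]; exact hc)
    obtain ⟨heq, hsound⟩ := pvMain r r 0 0 none false [] none (by simp)
      (fun _ h => by cases h) (fun _ => ⟨rfl, rfl⟩) (fun c hc => by simp at hc)
      (fun c hc => by simp at hc) (fun _ _ => hhead) (fun p h => by cases h)
    rw [heq]
    cases htk : pvTokB r 0 0 none false [] with
    | nil => simp [pvG]
    | cons hd ts =>
      obtain ⟨t0, e0⟩ := hd
      simp only [pvG]
      rw [pvG_eq_findCut]
      cases hfc : pvFindCut e0 ts with
      | none => rfl
      | some p =>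
        have hQp : pvQ r p := by
          apply hsound p
          rw [htk]; simp only [pvG]; rw [pvG_eq_findCut, hfc]
        obtain ⟨c, hcl, hcs⟩ := hQp
        have htake : PySem.Chars.slice r none (some (p : Int)) = r.take p := by
          rw [PySem.Chars.slice_eq_listSlice, PySem.List.slice_to_natCast]
        have h1 : ∀ c', (r.take p).head? = some c' → PySem.Chars.isspace c' = false :=
          fun c' hc' => hhead c' (pvHeadTake hc')
        have h2 : ∀ c', (r.take p).getLast? = some c' → PySem.Chars.isspace c' = false := by
          intro c' hc'
          rw [hcl] at hc'; cases hc'; exact hcs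
        show String.ofList (PySem.Chars.strip (PySem.Chars.slice r none (some (p : Int)))) =
          String.ofList (List.take p r)
        rw [htake, pvStripId (r.take p) h1 h2]
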